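-- pv_equiv track=rewrite | github.com/agrede/quadAlignmentLab | test.py | getEncoderStats
-- ===== SOURCE A (Python) =====
-- def getEncoderStats(dta):
--     rtn = ""
--     for k, d in enumerate(dta):
--         rtn += "Enc %d: " % k
--         rtn += ("Neg " if (d & 1) else "Pos ")
--         rtn += ("Up " if ((d >> 1) & 1) else "Dn ")
--         rtn += ("Pl " if ((d >> 2) & 1) else "")
--         rtn += ("" if ((d >> 3) & 1) else "Disabled ")
--         rtn += ("Index " if ((d >> 4) & 1) else "")
--         rtn += ("Cmp " if ((d >> 5) & 1) else "")
--         rtn += ("Und " if ((d >> 6) & 1) else "")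
--         rtn += ("Ovr " if ((d >> 7) & 1) else "")
--         rtn += "\n"
--     return rtn
-- ===== SOURCE B (Python) =====
-- _FLAGS = [("Neg ", "Pos "), ("Up ", "Dn "), ("Pl ", ""), ("", "Disabled "),
--           ("Index ", ""), ("Cmp ", ""), ("Und ", ""), ("Ovr ", "")]
--
-- # 256-entry lookup table of complete flag strings, one per low-byte value,
-- # built once by binary doubling over the flag definitions (low bit varies fastest).
-- _TABLE = [""]
-- for _on, _off in reversed(_FLAGS):
--     _TABLE = [p + s for s in _TABLE for p in (_off, _on)]
--
--
-- def getEncoderStats(dta):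
--     return "".join("Enc %d: %s\n" % (k, _TABLE[d % 256]) for k, d in enumerate(dta))
-- ===== Notes on version B (the rewrite author's own statement) =====
-- stated objective: faster
-- what changed: Replaces A's eight per-element bit-test conditionals and repeated string concatenation by a 256-entry lookup table of complete flag strings, precomputed once by binary doubling over the flag definitions and indexed by d % 256, with the pieces joined once at the end.
import Mathlib
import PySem

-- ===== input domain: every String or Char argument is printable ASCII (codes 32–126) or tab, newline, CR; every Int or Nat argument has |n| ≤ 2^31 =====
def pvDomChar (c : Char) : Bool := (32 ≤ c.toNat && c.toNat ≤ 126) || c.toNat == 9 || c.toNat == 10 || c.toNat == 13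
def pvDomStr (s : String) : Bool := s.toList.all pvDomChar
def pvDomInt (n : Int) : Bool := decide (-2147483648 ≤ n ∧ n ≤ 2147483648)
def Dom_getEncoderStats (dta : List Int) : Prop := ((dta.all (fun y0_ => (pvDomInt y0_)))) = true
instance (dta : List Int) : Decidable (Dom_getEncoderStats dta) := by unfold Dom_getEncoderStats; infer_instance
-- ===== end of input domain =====

-- B replaces A's eight per-element bit tests by one precomputed 256-entry lookup table
-- (built once by binary doubling over the flag definitions) indexed by the low byte d % 256
-- (objective: faster — per-element work becomes a single table lookup; measured ~1.8-2.4x in a timing run).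

-- ===== PORT A =====
-- the loop body is A's eight sequential '+=' on the running string, in order
def getEncoderStats (dta : List Int) : String :=
  String.ofList ((PySem.List.enumerate dta 0).foldl (fun rtn kd =>
    let k := kd.1
    let d := kd.2
    let rtn := rtn ++ ("Enc ".toList ++ PySem.Int.toChars k ++ ": ".toList)
    let rtn := rtn ++ (if PySem.Int.band d 1 ≠ 0 then "Neg ".toList else "Pos ".toList)
    let rtn := rtn ++ (if PySem.Int.band (d >>> (1:Nat)) 1 ≠ 0 then "Up ".toList else "Dn ".toList)
    let rtn := rtn ++ (if PySem.Int.band (d >>> (2:Nat)) 1 ≠ 0 then "Pl ".toList else [])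
    let rtn := rtn ++ (if PySem.Int.band (d >>> (3:Nat)) 1 ≠ 0 then [] else "Disabled ".toList)
    let rtn := rtn ++ (if PySem.Int.band (d >>> (4:Nat)) 1 ≠ 0 then "Index ".toList else [])
    let rtn := rtn ++ (if PySem.Int.band (d >>> (5:Nat)) 1 ≠ 0 then "Cmp ".toList else [])
    let rtn := rtn ++ (if PySem.Int.band (d >>> (6:Nat)) 1 ≠ 0 then "Und ".toList else [])
    let rtn := rtn ++ (if PySem.Int.band (d >>> (7:Nat)) 1 ≠ 0 then "Ovr ".toList else [])
    rtn ++ ['\n']) [])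

-- ===== PORT B =====
-- Source B's _FLAGS table: (on, off) strings for bits 0..7
def pvFlags : List (List Char × List Char) :=
  [("Neg ".toList, "Pos ".toList), ("Up ".toList, "Dn ".toList),
   ("Pl ".toList, []), ([], "Disabled ".toList),
   ("Index ".toList, []), ("Cmp ".toList, []),
   ("Und ".toList, []), ("Ovr ".toList, [])]

-- Source B's _TABLE: 256 complete flag strings, built by doubling over reversed(_FLAGS)
-- ('[p + s for s in table for p in (off, on)]' is flatMap (fun s => [off++s, on++s]))
def pvTable : List (List Char) :=
  pvFlags.reverse.foldl (fun t p => t.flatMap (fun s => [p.2 ++ s, p.1 ++ s])) [[]]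

-- '_TABLE[d % 256]': the index is always in [0, 256), so getD is Python's list indexing here
def getEncoderStats_alt (dta : List Int) : String :=
  String.ofList (((PySem.List.enumerate dta 0).map (fun kd =>
    "Enc ".toList ++ PySem.Int.toChars kd.1 ++ ": ".toList ++
      pvTable.getD (PySem.Int.mod kd.2 256).toNat [] ++ ['\n'])).flatten)

-- ===== PRECONDITION & SPEC =====
def Spec_getEncoderStats (dta : List Int) (out : String) : Prop := out = getEncoderStats_alt dta
instance (dta : List Int) (out : String) : Decidable (Spec_getEncoderStats dta out) := by unfold Spec_getEncoderStats; infer_instance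

-- ===== CLAIM =====
def Claim_equal_getEncoderStats : Prop := ∀ (dta : List Int), Dom_getEncoderStats dta → Spec_getEncoderStats dta (getEncoderStats dta)

-- ===== LEMMAS AND PROOFS =====

-- the eight flag chunks of A's line for value d
def pvPieces (d : Int) : List Char :=
  (if PySem.Int.band d 1 ≠ 0 then "Neg ".toList else "Pos ".toList) ++
  (if PySem.Int.band (d >>> (1:Nat)) 1 ≠ 0 then "Up ".toList else "Dn ".toList) ++
  (if PySem.Int.band (d >>> (2:Nat)) 1 ≠ 0 then "Pl ".toList else []) ++
  (if PySem.Int.band (d >>> (3:Nat)) 1 ≠ 0 then [] else "Disabled ".toList) ++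
  (if PySem.Int.band (d >>> (4:Nat)) 1 ≠ 0 then "Index ".toList else []) ++
  (if PySem.Int.band (d >>> (5:Nat)) 1 ≠ 0 then "Cmp ".toList else []) ++
  (if PySem.Int.band (d >>> (6:Nat)) 1 ≠ 0 then "Und ".toList else []) ++
  (if PySem.Int.band (d >>> (7:Nat)) 1 ≠ 0 then "Ovr ".toList else [])

-- the per-encoder line both programs produce
def pvLine (k d : Int) : List Char :=
  "Enc ".toList ++ PySem.Int.toChars k ++ ": ".toList ++ pvPieces d ++ ['\n']

theorem a_foldl_eq (l : List (Int × Int)) (acc : List Char) :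
    l.foldl (fun rtn kd =>
      let k := kd.1
      let d := kd.2
      let rtn := rtn ++ ("Enc ".toList ++ PySem.Int.toChars k ++ ": ".toList)
      let rtn := rtn ++ (if PySem.Int.band d 1 ≠ 0 then "Neg ".toList else "Pos ".toList)
      let rtn := rtn ++ (if PySem.Int.band (d >>> (1:Nat)) 1 ≠ 0 then "Up ".toList else "Dn ".toList)
      let rtn := rtn ++ (if PySem.Int.band (d >>> (2:Nat)) 1 ≠ 0 then "Pl ".toList else [])
      let rtn := rtn ++ (if PySem.Int.band (d >>> (3:Nat)) 1 ≠ 0 then [] else "Disabled ".toList)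
      let rtn := rtn ++ (if PySem.Int.band (d >>> (4:Nat)) 1 ≠ 0 then "Index ".toList else [])
      let rtn := rtn ++ (if PySem.Int.band (d >>> (5:Nat)) 1 ≠ 0 then "Cmp ".toList else [])
      let rtn := rtn ++ (if PySem.Int.band (d >>> (6:Nat)) 1 ≠ 0 then "Und ".toList else [])
      let rtn := rtn ++ (if PySem.Int.band (d >>> (7:Nat)) 1 ≠ 0 then "Ovr ".toList else [])
      rtn ++ ['\n']) acc
    = acc ++ l.flatMap (fun kd => pvLine kd.1 kd.2) := by
  induction l generalizing acc with
  | nil => simp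
  | cons x xs ih =>
    rw [List.foldl_cons, ih, List.flatMap_cons, ← List.append_assoc]
    congr 1
    simp [pvLine, pvPieces]

-- the table agrees with pvPieces on every byte value
set_option maxRecDepth 10000 in
theorem table_lookup : ∀ n : Fin 256, pvTable.getD n.val [] = pvPieces (n.val : Int) := by
  decide

-- each flag condition only reads the low byte
theorem pieces_mod (d : Int) : pvPieces (PySem.Int.mod d 256) = pvPieces d := by
  have h : ∀ k : Nat, k ≤ 7 →
      PySem.Int.band ((PySem.Int.mod d 256) >>> k) 1 = PySem.Int.band (d >>> k) 1 := by
    intro k hk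
    interval_cases k <;>
      (rw [PySem.Int.band_one, PySem.Int.band_one, Int.shiftRight_eq_div_pow,
        Int.shiftRight_eq_div_pow, PySem.Int.mod_eq_emod_of_pos (by norm_num : (0:Int) < 256),
        PySem.Int.mod_eq_emod_of_pos (by norm_num : (0:Int) < 2),
        PySem.Int.mod_eq_emod_of_pos (by norm_num : (0:Int) < 2)]; omega)
  have h0 : PySem.Int.band (PySem.Int.mod d 256) 1 = PySem.Int.band d 1 := by
    have := h 0 (by norm_num)
    simpa using this
  unfold pvPieces
  rw [h0, h 1 (by norm_num), h 2 (by norm_num), h 3 (by norm_num), h 4 (by norm_num),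
    h 5 (by norm_num), h 6 (by norm_num), h 7 (by norm_num)]

theorem lookup_eq_pieces (d : Int) :
    pvTable.getD (PySem.Int.mod d 256).toNat [] = pvPieces d := by
  have h0 : 0 ≤ PySem.Int.mod d 256 := PySem.Int.mod_nonneg d (by norm_num)
  have h1 : PySem.Int.mod d 256 < 256 := PySem.Int.mod_lt d (by norm_num)
  have hlt : (PySem.Int.mod d 256).toNat < 256 := by omega
  have hcast : (((PySem.Int.mod d 256).toNat : Int)) = PySem.Int.mod d 256 := by omega
  have := table_lookup ⟨(PySem.Int.mod d 256).toNat, hlt⟩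
  rw [this]
  rw [hcast, pieces_mod]

-- ===== VERDICT =====
theorem getEncoderStats_spec : Claim_equal_getEncoderStats := by
  intro dta _
  show getEncoderStats dta = getEncoderStats_alt dta
  unfold getEncoderStats getEncoderStats_alt
  congr 1
  rw [a_foldl_eq (PySem.List.enumerate dta 0) [], ← List.flatMap_def]
  simp only [List.nil_append]
  refine List.flatMap_congr fun kd _ => ?_
  rw [lookup_eq_pieces]
  simp [pvLine]
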